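-- pv_equiv track=rewrite | github.com/radixark/miles | miles/utils/debug_utils/run_megatron/cli/prompt_utils.py | _build_math_sequence
-- ===== SOURCE A (Python) =====
-- def _build_math_sequence(target_char_length: int) -> str:
--     """Build "1+1=2, 1+2=3, ..." until reaching target_char_length characters."""
--     parts: list[str] = []
--     total_len: int = 0
--     a: int = 1
--     b: int = 1
--
--     while total_len < target_char_length:
--         segment: str = f"{a}+{b}={a + b}, "
--         parts.append(segment)
--         total_len += len(segment)
--         b += 1
--         if b > 100:
--             a += 1
--             b = 1
--
--     return "".join(parts)
-- ===== SOURCE B (Python) =====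
-- def _build_math_sequence(target_char_length: int) -> str:
--     """Build "1+1=2, 1+2=3, ..." until reaching target_char_length characters."""
--     # Stage 1: determine how many segments are needed, by pure length
--     # arithmetic (len of the decimal renderings plus 4 fixed characters
--     # for '+', '=', ',', ' '), without assembling any output.
--     n = 0
--     total = 0
--     while total < target_char_length:
--         a, b = divmod(n, 100)
--         total += len(str(a + 1)) + len(str(b + 1)) + len(str(a + b + 2)) + 4
--         n += 1
--     # Stage 2: generate exactly those n segments by index and join them.
--     return "".join(
--         f"{k // 100 + 1}+{k % 100 + 1}={k // 100 + k % 100 + 2}, " for k in range(n)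
--     )
-- ===== Notes on version B (the rewrite author's own statement) =====
-- stated objective: alternative
-- what changed: B splits the work into two staged passes: a purely numeric first pass that computes the required segment count from decimal digit-lengths (no output text is assembled), then a second pass that generates exactly that many segments by index and joins them, instead of A's single loop that interleaves building, appending and length tracking with explicit counter rollover.
import Mathlib
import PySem

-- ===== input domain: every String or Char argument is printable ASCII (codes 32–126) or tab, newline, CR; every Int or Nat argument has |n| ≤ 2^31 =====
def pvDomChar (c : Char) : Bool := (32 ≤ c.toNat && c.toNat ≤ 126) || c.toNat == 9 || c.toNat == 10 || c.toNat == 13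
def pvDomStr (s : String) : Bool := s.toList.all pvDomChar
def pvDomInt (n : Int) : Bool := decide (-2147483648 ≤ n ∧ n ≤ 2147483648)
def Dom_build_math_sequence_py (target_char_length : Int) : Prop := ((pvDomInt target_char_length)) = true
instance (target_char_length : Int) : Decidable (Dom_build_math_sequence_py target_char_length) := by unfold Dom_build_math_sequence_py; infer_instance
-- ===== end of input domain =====

-- B replaces A's single loop (which interleaves segment construction, appending and
-- length tracking with counter rollover) by two staged passes: a purely numeric pass
-- computing the segment count from digit lengths, then index-based generation + join;
-- objective: alternative.


-- ===== PORT A =====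
-- f"{a}+{b}={a+b}, "
def pvSegA (a b : Int) : String :=
  PySem.Int.toStr a ++ "+" ++ PySem.Int.toStr b ++ "=" ++ PySem.Int.toStr (a + b) ++ ", "

-- used by the ports' decreasing_by: each appended segment has length ≥ 1
theorem pvSegA_len_pos (a b : Int) : 1 ≤ PySem.Str.len (pvSegA a b) := by
  simp [pvSegA, PySem.Str.len_eq]
  omega

-- A's while loop: state (parts, total_len, a, b)
def pvLoopA (t : Int) (parts : List String) (total a b : Int) : String :=
  if total < t then
    let segment := pvSegA a b
    let parts' := parts ++ [segment]
    let total' := total + PySem.Str.len segment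
    if b + 1 > 100 then pvLoopA t parts' total' (a + 1) 1
    else pvLoopA t parts' total' a (b + 1)
  else PySem.Str.join "" parts
termination_by (t - total).toNat
decreasing_by
  all_goals (have h := pvSegA_len_pos a b; omega)

def build_math_sequence_py (target_char_length : Int) : String :=
  pvLoopA target_char_length [] 0 1 1

-- ===== PORT B =====
-- len(str(a+1)) + len(str(b+1)) + len(str(a+b+2)) + 4  with a, b = divmod(n, 100)
def pvSegLen (n : Int) : Int :=
  let a := PySem.Int.floordiv n 100
  let b := PySem.Int.mod n 100
  PySem.Str.len (PySem.Int.toStr (a + 1)) + PySem.Str.len (PySem.Int.toStr (b + 1)) +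
    PySem.Str.len (PySem.Int.toStr (a + b + 2)) + 4

-- used by B's decreasing_by: each counted segment length is ≥ 1
theorem pvSegLen_pos (n : Int) : 1 ≤ pvSegLen n := by
  simp [pvSegLen, PySem.Str.len_eq]
  omega

-- B's stage-1 counting loop: state (n, total); returns the segment count n
def pvCountB (t total n : Int) : Int :=
  if total < t then pvCountB t (total + pvSegLen n) (n + 1) else n
termination_by (t - total).toNat
decreasing_by
  have h := pvSegLen_pos n
  omega

-- f"{k // 100 + 1}+{k % 100 + 1}={k // 100 + k % 100 + 2}, "
def pvSegB (k : Int) : String :=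
  PySem.Int.toStr (PySem.Int.floordiv k 100 + 1) ++ "+" ++
    PySem.Int.toStr (PySem.Int.mod k 100 + 1) ++ "=" ++
    PySem.Int.toStr (PySem.Int.floordiv k 100 + PySem.Int.mod k 100 + 2) ++ ", "

-- B's stage 2: generate the n segments by index and join
def build_math_sequence_py_alt (target_char_length : Int) : String :=
  PySem.Str.join "" ((PySem.List.pyRange 0 (pvCountB target_char_length 0 0) 1).map pvSegB)

-- ===== PRECONDITION & SPEC =====
def Spec_build_math_sequence_py (target_char_length : Int) (out : String) : Prop := out = build_math_sequence_py_alt target_char_length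
instance (target_char_length : Int) (out : String) : Decidable (Spec_build_math_sequence_py target_char_length out) := by unfold Spec_build_math_sequence_py; infer_instance

-- ===== CLAIM (what is proved, stated in full; the proofs are below) =====
def Claim_equal_build_math_sequence_py : Prop := ∀ (target_char_length : Int), Dom_build_math_sequence_py target_char_length → Spec_build_math_sequence_py target_char_length (build_math_sequence_py target_char_length)

-- ===== LEMMAS AND PROOFS =====

-- abstract remainder of A's loop, depending only on (total, a, b)
def pvTail (t total a b : Int) : String :=
  if total < t then
    pvSegA a b ++
      (if b + 1 > 100 then pvTail t (total + PySem.Str.len (pvSegA a b)) (a + 1) 1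
       else pvTail t (total + PySem.Str.len (pvSegA a b)) a (b + 1))
  else ""
termination_by (t - total).toNat
decreasing_by
  all_goals (have h := pvSegA_len_pos a b; omega)

theorem pvCharsJoin_nil (xs : List (List Char)) : PySem.Chars.join [] xs = xs.flatten := by
  simp only [PySem.Chars.join, List.intercalate]
  induction xs with
  | nil => simp
  | cons h t ih => cases t <;> simp_all [List.intersperse]

theorem pvJoin_append (p : List String) (s : String) :
    PySem.Str.join "" (p ++ [s]) = PySem.Str.join "" p ++ s := by
  apply String.toList_inj.mp
  simp [PySem.Str.join, pvCharsJoin_nil]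

theorem pvJoin_cons (s : String) (p : List String) :
    PySem.Str.join "" (s :: p) = s ++ PySem.Str.join "" p := by
  apply String.toList_inj.mp
  simp [PySem.Str.join, pvCharsJoin_nil]

theorem pvLoopA_eq_tail (t : Int) (parts : List String) (total a b : Int) :
    pvLoopA t parts total a b = PySem.Str.join "" parts ++ pvTail t total a b := by
  fun_induction pvLoopA t parts total a b with
  | case1 parts total a b hlt segment parts' total' hb ih =>
      rw [ih]; conv_rhs => rw [pvTail, if_pos hlt, if_pos hb]
      rw [pvJoin_append, String.append_assoc]
  | case2 parts total a b hlt segment parts' total' hb ih =>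
      rw [ih]; conv_rhs => rw [pvTail, if_pos hlt, if_neg hb]
      rw [pvJoin_append, String.append_assoc]
  | case3 parts total a b hge =>
      rw [pvTail, if_neg hge]
      simp

-- B's indexed segment is A's segment at (k//100 + 1, k%100 + 1)
theorem pvSegB_eq (k : Int) :
    pvSegB k = pvSegA (PySem.Int.floordiv k 100 + 1) (PySem.Int.mod k 100 + 1) := by
  have : PySem.Int.floordiv k 100 + PySem.Int.mod k 100 + 2 =
      (PySem.Int.floordiv k 100 + 1) + (PySem.Int.mod k 100 + 1) := by ring
  rw [pvSegB, pvSegA, this]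

-- the numeric length B adds for index k is the string length of A's segment there
theorem pvSegLen_eq (k : Int) :
    pvSegLen k = PySem.Str.len (pvSegA (PySem.Int.floordiv k 100 + 1) (PySem.Int.mod k 100 + 1)) := by
  rw [pvSegA, show PySem.Int.floordiv k 100 + 1 + (PySem.Int.mod k 100 + 1) =
      PySem.Int.floordiv k 100 + PySem.Int.mod k 100 + 2 from by ring]
  simp [pvSegLen, PySem.Str.len_eq]
  omega

-- the counting loop never returns less than its starting index
theorem pvCountB_ge (t total n : Int) : n ≤ pvCountB t total n := by
  fun_induction pvCountB t total n with
  | case1 total n hlt ih => omega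
  | case2 total n hge => omega

-- A's remaining output equals the join of B's segments over the counted range
theorem pvTail_eq_gen (t total k : Int) :
    pvTail t total (PySem.Int.floordiv k 100 + 1) (PySem.Int.mod k 100 + 1) =
      PySem.Str.join "" ((PySem.List.pyRange k (pvCountB t total k) 1).map pvSegB) := by
  have h100 : (0:Int) < 100 := by norm_num
  fun_induction pvCountB t total k with
  | case1 total k hlt ih =>
      have hrange : PySem.List.pyRange k (pvCountB t (total + pvSegLen k) (k + 1)) 1 =
          k :: PySem.List.pyRange (k + 1) (pvCountB t (total + pvSegLen k) (k + 1)) 1 := by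
        have := pvCountB_ge t (total + pvSegLen k) (k + 1)
        exact PySem.List.pyRange_one_cons (by omega)
      rw [pvTail, if_pos hlt, hrange, List.map_cons, pvJoin_cons, ← pvSegLen_eq, ← pvSegB_eq]
      simp only [PySem.Int.floordiv_eq_ediv_of_pos h100, PySem.Int.mod_eq_emod_of_pos h100] at ih ⊢
      by_cases h : k % 100 = 99
      · have hb : k % 100 + 1 + 1 > 100 := by omega
        rw [if_pos hb]
        have e1 : (k + 1) / 100 + 1 = k / 100 + 1 + 1 := by omega
        have e2 : (k + 1) % 100 + 1 = (1 : Int) := by omega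
        rw [e1, e2] at ih
        rw [← ih]
      · have hb : ¬ (k % 100 + 1 + 1 > 100) := by omega
        rw [if_neg hb]
        have e1 : (k + 1) / 100 + 1 = k / 100 + 1 := by omega
        have e2 : (k + 1) % 100 + 1 = k % 100 + 1 + 1 := by omega
        rw [e1, e2] at ih
        rw [← ih]
  | case2 total k hge =>
      have hnil : PySem.List.pyRange k k 1 = [] :=
        List.eq_nil_of_length_eq_zero (by simp)
      rw [pvTail, if_neg hge, hnil]
      apply String.toList_inj.mp
      simp [PySem.Str.join, PySem.Chars.join, List.intercalate]

theorem pv_main (t : Int) : build_math_sequence_py t = build_math_sequence_py_alt t := by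
  rw [build_math_sequence_py, build_math_sequence_py_alt, pvLoopA_eq_tail]
  have h := pvTail_eq_gen t 0 0
  norm_num [PySem.Int.floordiv, PySem.Int.mod] at h
  rw [← h]
  apply String.toList_inj.mp
  simp [PySem.Str.join]

-- ===== VERDICT (by name: the statement is the Claim_ definition above) =====
theorem build_math_sequence_py_spec : Claim_equal_build_math_sequence_py := by
  intro t _
  exact pv_main t
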